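-- pv_equiv track=rewrite | github.com/matthematics/schubmult | schubmult/perm_lib.py | elem_sym_perms_op
-- ===== SOURCE A (Python) =====
-- def permtrim(perm):
-- 	L = len(perm)
-- 	while L > 2 and perm[-1] == L:
-- 		L = perm.pop() - 1
-- 	return perm
--
-- def has_bruhat_descent(perm,i,j):
-- 	if perm[i]<perm[j]:
-- 		return False
-- 	for p in range(i+1,j):
-- 		if perm[i]>perm[p] and perm[p]>perm[j]:
-- 			return False
-- 	return True
--
-- def elem_sym_perms_op(orig_perm,p,k):
-- 	total_list = [(orig_perm,0)]
-- 	up_perm_list = [(orig_perm,k)]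
-- 	for pp in range(p):
-- 		perm_list = []
-- 		for up_perm, last in up_perm_list:
-- 			up_perm2 = [*up_perm]
-- 			if len(up_perm2) < k + 1:
-- 				up_perm2 += [i+1 for i in range(len(up_perm2),k+2)]
-- 			pos_list = [i for i in range(k) if up_perm2[i] == orig_perm[i]]
-- 			for j in range(last,len(up_perm2)):
-- 				for i in pos_list:
-- 					if has_bruhat_descent(up_perm2,i,j):
-- 						new_perm = [*up_perm2]
-- 						new_perm[i],new_perm[j] = new_perm[j],new_perm[i]
-- 						new_perm_add = tuple(permtrim(new_perm))
-- 						perm_list += [(new_perm_add,j)]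
-- 						total_list+=[(new_perm_add,pp+1)]
-- 		up_perm_list = perm_list
-- 	return total_list
-- ===== SOURCE B (Python) =====
-- def elem_sym_perms_op(orig_perm, p, k):
--     # Staged BFS: each round's successors come from ONE left-to-right sweep over
--     # positions j, maintaining per candidate position i the running max of the
--     # intermediate values below up2[i] (so no interval is ever re-scanned), and
--     # rounds are whole frontier lists instead of a shared threaded accumulator.
--     def successors(up_perm, last):
--         up2 = list(up_perm)
--         if len(up2) < k + 1:
--             up2.extend(range(len(up2) + 1, k + 3))
--         n = len(up2)
--         items = [(i, None) for i in range(k) if up2[i] == orig_perm[i]]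
--         out = []
--         for j in range(n):
--             vj = up2[j]
--             if last <= j:
--                 for i, m in items:
--                     if vj <= up2[i] and (m is None or m <= vj):
--                         np = list(up2)
--                         np[i], np[j] = np[j], np[i]
--                         L = n
--                         while L > 2 and np[L - 1] == L:
--                             L -= 1
--                         out.append((tuple(np[:L]), j))
--             items = [(i, vj if i < j and vj < up2[i] and (m is None or m < vj) else m)
--                      for i, m in items]
--         return out
--
--     total = [(orig_perm, 0)]
--     frontier = [(orig_perm, k)]
--     for pp in range(p):
--         frontier = [s for up, last in frontier for s in successors(up, last)]
--         total.extend((t, pp + 1) for t, _ in frontier)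
--     return total
-- ===== Notes on version B (the rewrite author's own statement) =====
-- stated objective: alternative
-- what changed: Each frontier permutation is processed by a single left-to-right sweep over positions j that maintains, for every candidate position i, the running max intermediate value below up2[i], so the per-pair interval re-scan of has_bruhat_descent disappears; rounds are staged as whole frontier lists built with comprehensions/flatMap instead of threading one shared (total, perm_list) accumulator, and trimming slices instead of popping.
import Mathlib
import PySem

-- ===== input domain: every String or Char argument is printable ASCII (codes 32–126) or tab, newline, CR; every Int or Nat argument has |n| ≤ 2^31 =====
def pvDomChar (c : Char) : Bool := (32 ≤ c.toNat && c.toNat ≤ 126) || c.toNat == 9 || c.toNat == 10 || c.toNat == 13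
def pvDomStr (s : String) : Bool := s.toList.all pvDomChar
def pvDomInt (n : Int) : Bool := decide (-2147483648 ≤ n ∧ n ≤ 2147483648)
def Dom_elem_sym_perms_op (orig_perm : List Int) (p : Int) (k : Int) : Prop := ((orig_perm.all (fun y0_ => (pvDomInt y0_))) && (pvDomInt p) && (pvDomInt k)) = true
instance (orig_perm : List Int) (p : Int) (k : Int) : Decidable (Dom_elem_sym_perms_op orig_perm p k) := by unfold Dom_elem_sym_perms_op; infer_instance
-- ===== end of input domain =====

-- B is an alternative algorithm with the same return value: per frontier permutation one
-- left-to-right sweep over j maintains, for every candidate i, the running max intermediate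
-- value below up2[i], so Bruhat-cover tests never re-scan an interval; rounds are staged as
-- whole frontier lists (flatMap) instead of threading one shared accumulator pair.

-- ===== PORT A =====
-- permtrim: the pop-loop 'while L > 2 and perm[-1] == L: L = perm.pop() - 1' (L stays len(perm))
def pvTrimA (perm : List Int) : List Int :=
  if h : 2 < perm.length ∧ PySem.List.pyGetD perm (-1) 0 = (perm.length : Int)
  then pvTrimA perm.dropLast
  else perm
termination_by perm.length
decreasing_by simp [List.length_dropLast]; omega

-- the 'for p in range(i+1, j)' loop of has_bruhat_descent, with its early 'return False'
def pvHbdLoop (perm : List Int) (i j : Int) : List Int → Bool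
  | [] => true
  | q :: rest =>
    if PySem.List.pyGetD perm i 0 > PySem.List.pyGetD perm q 0 ∧
       PySem.List.pyGetD perm q 0 > PySem.List.pyGetD perm j 0 then false
    else pvHbdLoop perm i j rest

def pvHbd (perm : List Int) (i j : Int) : Bool :=
  if PySem.List.pyGetD perm i 0 < PySem.List.pyGetD perm j 0 then false
  else pvHbdLoop perm i j (PySem.List.pyRange (i + 1) j 1)

-- state = (total_list, perm_list); indexing via pyGetD/pySetD (in range wherever Python does not raise)
def pvIStepA (up2 : List Int) (pp j : Int)
    (acc : (List (List Int × Int)) × (List (List Int × Int))) (i : Int) :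
    (List (List Int × Int)) × (List (List Int × Int)) :=
  if pvHbd up2 i j then
    let np := PySem.List.pySetD (PySem.List.pySetD up2 i (PySem.List.pyGetD up2 j 0)) j
                (PySem.List.pyGetD up2 i 0)
    let t := pvTrimA np
    (acc.1 ++ [(t, pp + 1)], acc.2 ++ [(t, j)])
  else acc

def pvJStepA (up2 : List Int) (pos_list : List Int) (pp : Int)
    (acc : (List (List Int × Int)) × (List (List Int × Int))) (j : Int) :
    (List (List Int × Int)) × (List (List Int × Int)) :=
  pos_list.foldl (pvIStepA up2 pp j) acc

def pvEntryA (orig : List Int) (k pp : Int)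
    (acc : (List (List Int × Int)) × (List (List Int × Int))) (ul : List Int × Int) :
    (List (List Int × Int)) × (List (List Int × Int)) :=
  let up2 := if (ul.1.length : Int) < k + 1
             then ul.1 ++ (PySem.List.pyRange (ul.1.length : Int) (k + 2) 1).map (fun i => i + 1)
             else ul.1
  let pos_list := (PySem.List.pyRange 0 k 1).filter
      (fun i => PySem.List.pyGetD up2 i 0 == PySem.List.pyGetD orig i 0)
  (PySem.List.pyRange ul.2 (up2.length : Int) 1).foldl (pvJStepA up2 pos_list pp) acc

def pvRoundA (orig : List Int) (k : Int)
    (st : (List (List Int × Int)) × (List (List Int × Int))) (pp : Int) :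
    (List (List Int × Int)) × (List (List Int × Int)) :=
  st.2.foldl (pvEntryA orig k pp) (st.1, [])

def elem_sym_perms_op (orig_perm : List Int) (p : Int) (k : Int) : List (List Int × Int) :=
  ((PySem.List.pyRange 0 p 1).foldl (pvRoundA orig_perm k) ([(orig_perm, 0)], [(orig_perm, k)])).1

-- ===== PORT B =====
-- 'm is None or m < v' / 'm is None or m <= v'
def pvMLt (m : Option Int) (v : Int) : Bool :=
  match m with | none => true | some x => decide (x < v)

def pvMOk (m : Option Int) (v : Int) : Bool :=
  match m with | none => true | some x => decide (x ≤ v)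

-- 'L = n; while L > 2 and np[L-1] == L: L -= 1'
def pvTrimLenB (perm : List Int) (L : Nat) : Nat :=
  if h : 2 < L ∧ PySem.List.pyGetD perm ((L : Int) - 1) 0 = (L : Int)
  then pvTrimLenB perm (L - 1)
  else L
termination_by L

-- the items comprehension '(i, vj if i < j and vj < up2[i] and (m is None or m < vj) else m)'
def pvItemUpd (up2 : List Int) (vj j : Int) (im : Int × Option Int) : Int × Option Int :=
  (im.1, if im.1 < j ∧ vj < PySem.List.pyGetD up2 im.1 0 ∧ pvMLt im.2 vj = true
         then some vj else im.2)

-- 'if vj <= up2[i] and (m is None or m <= vj): … out.append((tuple(np[:L]), j))'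
def pvEmitB (up2 : List Int) (n : Nat) (vj j : Int)
    (out : List (List Int × Int)) (im : Int × Option Int) : List (List Int × Int) :=
  if vj ≤ PySem.List.pyGetD up2 im.1 0 ∧ pvMOk im.2 vj = true then
    let np := PySem.List.pySetD (PySem.List.pySetD up2 im.1 vj) j (PySem.List.pyGetD up2 im.1 0)
    out ++ [(np.take (pvTrimLenB np n), j)]
  else out

-- one step of 'for j in range(n)': emit for the current j, then refresh every running max
def pvJB (up2 : List Int) (n : Nat) (last : Int)
    (st : (List (Int × Option Int)) × (List (List Int × Int))) (j : Int) :
    (List (Int × Option Int)) × (List (List Int × Int)) :=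
  let vj := PySem.List.pyGetD up2 j 0
  let out := if last ≤ j then st.1.foldl (pvEmitB up2 n vj j) st.2 else st.2
  (st.1.map (pvItemUpd up2 vj j), out)

def pvSuccB (orig : List Int) (k : Int) (up : List Int) (last : Int) : List (List Int × Int) :=
  let up2 := if (up.length : Int) < k + 1
             then up ++ PySem.List.pyRange ((up.length : Int) + 1) (k + 3) 1
             else up
  let n := up2.length
  let items := ((PySem.List.pyRange 0 k 1).filter
      (fun i => PySem.List.pyGetD up2 i 0 == PySem.List.pyGetD orig i 0)).map
      (fun i => (i, (none : Option Int)))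
  ((PySem.List.pyRange 0 (n : Int) 1).foldl (pvJB up2 n last) (items, [])).2

-- 'frontier = [s for up, last in frontier for s in successors(up, last)]; total.extend(…)'
def pvRoundB (orig : List Int) (k : Int)
    (st : (List (List Int × Int)) × (List (List Int × Int))) (pp : Int) :
    (List (List Int × Int)) × (List (List Int × Int)) :=
  let fr := st.2.flatMap (fun ul => pvSuccB orig k ul.1 ul.2)
  (st.1 ++ fr.map (fun s => (s.1, pp + 1)), fr)

def elem_sym_perms_op_alt (orig_perm : List Int) (p : Int) (k : Int) : List (List Int × Int) :=
  ((PySem.List.pyRange 0 p 1).foldl (pvRoundB orig_perm k) ([(orig_perm, 0)], [(orig_perm, k)])).1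

-- ===== PRECONDITION & SPEC =====
-- A raises IndexError (orig_perm[i] in the pos_list comprehension) exactly when p ≥ 1 and k > len(orig_perm)
def Pre_elem_sym_perms_op (orig_perm : List Int) (p : Int) (k : Int) : Prop :=
  p ≤ 0 ∨ k ≤ (orig_perm.length : Int)
instance (orig_perm : List Int) (p : Int) (k : Int) : Decidable (Pre_elem_sym_perms_op orig_perm p k) := by
  unfold Pre_elem_sym_perms_op; infer_instance

def pvWitness_elem_sym_perms_op : List Int × Int × Int := ([2, 1, 3], 1, 1)

def Spec_elem_sym_perms_op (orig_perm : List Int) (p : Int) (k : Int) (out : List (List Int × Int)) : Prop :=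
  out = elem_sym_perms_op_alt orig_perm p k
instance (orig_perm : List Int) (p : Int) (k : Int) (out : List (List Int × Int)) : Decidable (Spec_elem_sym_perms_op orig_perm p k out) := by
  unfold Spec_elem_sym_perms_op; infer_instance

-- ===== CLAIM (what is proved, stated in full; the proofs are below) =====
def Claim_equal_elem_sym_perms_op : Prop := ∀ (orig_perm : List Int) (p : Int) (k : Int), Dom_elem_sym_perms_op orig_perm p k → Pre_elem_sym_perms_op orig_perm p k → Spec_elem_sym_perms_op orig_perm p k (elem_sym_perms_op orig_perm p k)

-- ===== LEMMAS AND PROOFS =====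

-- ---- generic: a fold whose step appends to both components is a pair of flatMaps ----
theorem foldl_pair_append {α β γ : Type}
    (f : (List β × List γ) → α → (List β × List γ)) (u : α → List β) (w : α → List γ)
    (hf : ∀ acc x, f acc x = (acc.1 ++ u x, acc.2 ++ w x)) :
    ∀ (xs : List α) (acc : List β × List γ),
      xs.foldl f acc = (acc.1 ++ xs.flatMap u, acc.2 ++ xs.flatMap w) := by
  intro xs
  induction xs with
  | nil => intro acc; simp
  | cons x rest ih => intro acc; rw [List.foldl_cons, hf, ih]; simp

-- ---- A-side characterisation ----
-- emissions of A's inner body at (j, i)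
def pvG (up2 : List Int) (j i : Int) : List (List Int × Int) :=
  if pvHbd up2 i j then
    [(pvTrimA (PySem.List.pySetD (PySem.List.pySetD up2 i (PySem.List.pyGetD up2 j 0)) j
        (PySem.List.pyGetD up2 i 0)), j)]
  else []

-- emissions of A's whole entry loop for one frontier element
def pvEA (orig : List Int) (k : Int) (ul : List Int × Int) : List (List Int × Int) :=
  let up2 := if (ul.1.length : Int) < k + 1
             then ul.1 ++ (PySem.List.pyRange (ul.1.length : Int) (k + 2) 1).map (fun i => i + 1)
             else ul.1
  let pos := (PySem.List.pyRange 0 k 1).filter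
      (fun i => PySem.List.pyGetD up2 i 0 == PySem.List.pyGetD orig i 0)
  (PySem.List.pyRange ul.2 (up2.length : Int) 1).flatMap (fun j => pos.flatMap (pvG up2 j))

theorem iStepA_char (up2 : List Int) (pp j : Int) (acc : (List (List Int × Int)) × (List (List Int × Int))) (i : Int) :
    pvIStepA up2 pp j acc i = (acc.1 ++ (pvG up2 j i).map (fun s => (s.1, pp + 1)), acc.2 ++ pvG up2 j i) := by
  unfold pvIStepA pvG
  split_ifs with h <;> simp

theorem jStepA_char (up2 : List Int) (pos : List Int) (pp : Int) (acc : (List (List Int × Int)) × (List (List Int × Int))) (j : Int) :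
    pvJStepA up2 pos pp acc j =
      (acc.1 ++ (pos.flatMap (pvG up2 j)).map (fun s => (s.1, pp + 1)), acc.2 ++ pos.flatMap (pvG up2 j)) := by
  rw [pvJStepA, foldl_pair_append (pvIStepA up2 pp j)
    (fun i => (pvG up2 j i).map (fun s => (s.1, pp + 1))) (pvG up2 j) (iStepA_char up2 pp j)]
  simp [List.map_flatMap]

theorem entryA_char_core (up2 pos : List Int) (pp b : Int) (acc : (List (List Int × Int)) × (List (List Int × Int))) :
    (PySem.List.pyRange b (up2.length : Int) 1).foldl (pvJStepA up2 pos pp) acc =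
      (acc.1 ++ ((PySem.List.pyRange b (up2.length : Int) 1).flatMap (fun j => pos.flatMap (pvG up2 j))).map (fun s => (s.1, pp + 1)),
       acc.2 ++ (PySem.List.pyRange b (up2.length : Int) 1).flatMap (fun j => pos.flatMap (pvG up2 j))) := by
  rw [foldl_pair_append (pvJStepA up2 pos pp)
    (fun j => (pos.flatMap (pvG up2 j)).map (fun s => (s.1, pp + 1)))
    (fun j => pos.flatMap (pvG up2 j)) (jStepA_char up2 pos pp)]
  simp [List.map_flatMap]

theorem entryA_char (orig : List Int) (k pp : Int) (acc : (List (List Int × Int)) × (List (List Int × Int))) (ul : List Int × Int) :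
    pvEntryA orig k pp acc ul =
      (acc.1 ++ (pvEA orig k ul).map (fun s => (s.1, pp + 1)), acc.2 ++ pvEA orig k ul) := by
  unfold pvEntryA pvEA
  exact entryA_char_core _ _ _ _ _

theorem roundA_char (orig : List Int) (k pp : Int) (st : (List (List Int × Int)) × (List (List Int × Int))) :
    pvRoundA orig k st pp =
      (st.1 ++ (st.2.flatMap (pvEA orig k)).map (fun s => (s.1, pp + 1)), st.2.flatMap (pvEA orig k)) := by
  rw [pvRoundA, foldl_pair_append (pvEntryA orig k pp)
    (fun ul => (pvEA orig k ul).map (fun s => (s.1, pp + 1))) (pvEA orig k) (entryA_char orig k pp)]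
  simp [List.map_flatMap]


-- ---- trim characterisation (A's pop-loop = take of B's length loop) ----
theorem pvTrimLenB_le (perm : List Int) (L : Nat) : pvTrimLenB perm L ≤ L := by
  fun_induction pvTrimLenB perm L with
  | case1 L h ih => omega
  | case2 L h => omega

theorem pvTrimLenB_dropLast (perm : List Int) (L : Nat) (h : L + 1 ≤ perm.length) :
    pvTrimLenB perm.dropLast L = pvTrimLenB perm L := by
  induction L using Nat.strong_induction_on with
  | _ L ih =>
    conv_lhs => rw [pvTrimLenB]
    conv_rhs => rw [pvTrimLenB]
    by_cases h2 : 2 < L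
    · have hlt : (L : Int) - 1 = ((L - 1 : Nat) : Int) := by omega
      have hL1 : L - 1 < perm.dropLast.length := by simp [List.length_dropLast]; omega
      have hg : PySem.List.pyGetD perm.dropLast ((L : Int) - 1) 0 =
          PySem.List.pyGetD perm ((L : Int) - 1) 0 := by
        rw [hlt, PySem.List.pyGetD_natCast, PySem.List.pyGetD_natCast,
          List.getD_eq_getElem _ _ hL1, List.getD_eq_getElem _ _ (by omega)]
        exact List.getElem_dropLast _
      rw [hg]
      split_ifs with hc
      · exact ih (L - 1) (by omega) (by omega)
      · rfl
    · simp [h2]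

theorem pvCondIff (perm : List Int) :
    (2 < perm.length ∧ PySem.List.pyGetD perm (-1) 0 = (perm.length : Int)) ↔
    (2 < perm.length ∧ PySem.List.pyGetD perm ((perm.length : Int) - 1) 0 = (perm.length : Int)) := by
  by_cases h2 : 2 < perm.length
  · have hne : perm ≠ [] := by intro h; simp [h] at h2
    have h1 : PySem.List.pyGetD perm (-1) 0 = perm.getLast hne := PySem.List.pyGetD_neg_one perm 0 hne
    have h2' : PySem.List.pyGetD perm ((perm.length : Int) - 1) 0 = perm.getLast hne := by
      have hlt : (perm.length : Int) - 1 = ((perm.length - 1 : Nat) : Int) := by omega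
      rw [hlt, PySem.List.pyGetD_natCast, List.getD_eq_getElem _ _ (by omega),
        List.getLast_eq_getElem]
    rw [h1, h2']
  · simp [h2]

theorem pvTrimA_eq (perm : List Int) : pvTrimA perm = perm.take (pvTrimLenB perm perm.length) := by
  fun_induction pvTrimA perm with
  | case1 perm h ih =>
    have hlen : perm.dropLast.length = perm.length - 1 := List.length_dropLast
    rw [ih, hlen, pvTrimLenB_dropLast perm _ (by omega)]
    conv_rhs => rw [pvTrimLenB]
    rw [dif_pos ((pvCondIff perm).mp h)]
    have hM : pvTrimLenB perm (perm.length - 1) ≤ perm.length - 1 := pvTrimLenB_le _ _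
    rw [List.dropLast_eq_take, List.take_take]
    congr 1
    omega
  | case2 perm h =>
    conv_rhs => rw [pvTrimLenB]
    rw [dif_neg (fun hc => h ((pvCondIff perm).mpr hc)), List.take_length]

-- ---- running-max state vs A's interval re-scan ----
theorem pvHbdLoop_all (perm : List Int) (i j : Int) (qs : List Int) :
    pvHbdLoop perm i j qs =
      qs.all (fun q => !(decide (PySem.List.pyGetD perm q 0 < PySem.List.pyGetD perm i 0 ∧
        PySem.List.pyGetD perm j 0 < PySem.List.pyGetD perm q 0))) := by
  induction qs with
  | nil => rfl
  | cons q rest ih =>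
    rw [pvHbdLoop, List.all_cons]
    split_ifs with hc
    · simp [hc.1, hc.2]
    · rw [ih]
      have : ¬(PySem.List.pyGetD perm q 0 < PySem.List.pyGetD perm i 0 ∧
          PySem.List.pyGetD perm j 0 < PySem.List.pyGetD perm q 0) := by
        intro hx; exact hc ⟨hx.1, hx.2⟩
      simp [this]

-- one update step of the running max, as a function of the incoming value
def pvMUpd (vi : Int) (m : Option Int) (v : Int) : Option Int :=
  match m with
  | none => if v < vi then some v else none
  | some x => if v < vi ∧ x < v then some v else some x

theorem pvMOk_pvMUpd (vi : Int) (m : Option Int) (v vj : Int) :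
    pvMOk (pvMUpd vi m v) vj = (pvMOk m vj && !(decide (v < vi ∧ vj < v))) := by
  rcases m with _ | x
  · simp only [pvMOk, pvMUpd]
    by_cases h : v < vi <;> by_cases h2 : vj < v <;> simp [h, h2] <;> omega
  · simp only [pvMOk, pvMUpd]
    by_cases h : v < vi ∧ x < v <;> by_cases h2 : vj < v <;> by_cases h3 : x ≤ vj <;>
      simp [h, h2, h3] <;> omega

theorem pvMOk_fold (vi vj : Int) (pref : List Int) : ∀ (m : Option Int),
    pvMOk (pref.foldl (pvMUpd vi) m) vj =
      (pvMOk m vj && pref.all (fun v => !(decide (v < vi ∧ vj < v)))) := by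
  induction pref with
  | nil => simp
  | cons v rest ih =>
    intro m
    rw [List.foldl_cons, ih, pvMOk_pvMUpd, List.all_cons]
    rw [Bool.and_assoc]

theorem map_pyGetD_segment (xs : List Int) (a b : Int) (ha : 0 ≤ a) (hab : a ≤ b)
    (hb : b ≤ (xs.length : Int)) :
    (PySem.List.pyRange a b 1).map (fun q => PySem.List.pyGetD xs q 0) =
      (xs.drop a.toNat).take (b - a).toNat := by
  have hfull := PySem.List.map_pyGetD_pyRange' xs 0 ha
  rw [PySem.List.pyRange_one_append a b (xs.length : Int) hab hb, List.map_append] at hfull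
  rw [← hfull]
  exact (List.take_left' (by simp [PySem.List.length_pyRange_one])).symm

-- the true running max at sweep position a: fold of pvMUpd over the values strictly between i and a
def pvTrueM (up2 : List Int) (i a : Int) : Option Int :=
  ((up2.take a.toNat).drop (i.toNat + 1)).foldl (pvMUpd (PySem.List.pyGetD up2 i 0)) none

theorem pvTrueM_zero (up2 : List Int) (i : Int) : pvTrueM up2 i 0 = none := by
  simp [pvTrueM]

theorem itemUpd_true (up2 : List Int) (i a : Int) (hi0 : 0 ≤ i) (ha0 : 0 ≤ a)
    (han : a < (up2.length : Int)) :
    pvItemUpd up2 (PySem.List.pyGetD up2 a 0) a (i, pvTrueM up2 i a) = (i, pvTrueM up2 i (a + 1)) := by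
  unfold pvItemUpd
  by_cases hia : i < a
  · have hseg : (up2.take (a + 1).toNat).drop (i.toNat + 1) =
        (up2.take a.toNat).drop (i.toNat + 1) ++ [up2[a.toNat]'(by omega)] := by
      have h1 : (a + 1).toNat = a.toNat + 1 := by omega
      rw [h1, List.take_succ, List.getElem?_eq_getElem (by omega)]
      simp only [Option.toList_some]
      rw [List.drop_append_of_le_length (by simp [List.length_take]; omega)]
    have hget : PySem.List.pyGetD up2 a 0 = up2[a.toNat]'(by omega) :=
      by rw [PySem.List.pyGetD_eq_getElem _ _ ha0 han]
    have hrhs : pvTrueM up2 i (a + 1) =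
        pvMUpd (PySem.List.pyGetD up2 i 0) (pvTrueM up2 i a) (PySem.List.pyGetD up2 a 0) := by
      rw [pvTrueM, hseg, List.foldl_append, List.foldl_cons, List.foldl_nil, hget, pvTrueM]
    rw [hrhs]
    rcases hm : pvTrueM up2 i a with _ | x
    · simp only [pvMUpd, pvMLt]
      by_cases hcond : PySem.List.pyGetD up2 a 0 < PySem.List.pyGetD up2 i 0
      · rw [if_pos ⟨hia, hcond, trivial⟩, if_pos hcond]
      · rw [if_neg (fun h => hcond h.2.1), if_neg hcond]
    · simp only [pvMUpd, pvMLt]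
      by_cases hcond : PySem.List.pyGetD up2 a 0 < PySem.List.pyGetD up2 i 0 ∧ x < PySem.List.pyGetD up2 a 0
      · rw [if_pos ⟨hia, hcond.1, by simp [hcond.2]⟩, if_pos hcond]
      · rw [if_neg (fun h => hcond ⟨h.2.1, by simpa using h.2.2⟩), if_neg hcond]
  · have h1 : (up2.take a.toNat).drop (i.toNat + 1) = [] := by
      apply List.drop_eq_nil_of_le
      simp [List.length_take]
      omega
    have h2 : (up2.take (a + 1).toNat).drop (i.toNat + 1) = [] := by
      apply List.drop_eq_nil_of_le
      simp [List.length_take]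
      omega
    simp [pvTrueM, h1, h2, hia]

theorem emit_true (up2 : List Int) (i j : Int) (hi0 : 0 ≤ i) (hij : i < j)
    (hj : j < (up2.length : Int)) :
    (decide (PySem.List.pyGetD up2 j 0 ≤ PySem.List.pyGetD up2 i 0) &&
      pvMOk (pvTrueM up2 i j) (PySem.List.pyGetD up2 j 0)) = pvHbd up2 i j := by
  rw [pvTrueM, pvMOk_fold, pvHbd, pvHbdLoop_all]
  have hpref : (up2.take j.toNat).drop (i.toNat + 1) =
      (up2.drop (i.toNat + 1)).take (j.toNat - (i.toNat + 1)) := List.drop_take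
  have hseg : (PySem.List.pyRange (i + 1) j 1).map (fun q => PySem.List.pyGetD up2 q 0) =
      (up2.drop (i.toNat + 1)).take (j.toNat - (i.toNat + 1)) := by
    have h1 : (j - (i + 1)).toNat = j.toNat - (i.toNat + 1) := by omega
    have h2 : (i + 1).toNat = i.toNat + 1 := by omega
    rw [map_pyGetD_segment up2 (i + 1) j (by omega) (by omega) (by omega), h1, h2]
  have hall : (PySem.List.pyRange (i + 1) j 1).all
      (fun q => !(decide (PySem.List.pyGetD up2 q 0 < PySem.List.pyGetD up2 i 0 ∧
        PySem.List.pyGetD up2 j 0 < PySem.List.pyGetD up2 q 0))) =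
      ((up2.take j.toNat).drop (i.toNat + 1)).all
      (fun v => !(decide (v < PySem.List.pyGetD up2 i 0 ∧ PySem.List.pyGetD up2 j 0 < v))) := by
    rw [hpref, ← hseg, List.all_map]
    rfl
  rw [hall]
  by_cases hc : PySem.List.pyGetD up2 i 0 < PySem.List.pyGetD up2 j 0
  · simp [hc]
  · simp [hc, pvMOk]
    omega

-- ---- B's sweep characterisation ----
-- the list appended by one pvEmitB call
def pvCh (up2 : List Int) (n : Nat) (vj j : Int) (im : Int × Option Int) : List (List Int × Int) :=
  if vj ≤ PySem.List.pyGetD up2 im.1 0 ∧ pvMOk im.2 vj = true then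
    [(((PySem.List.pySetD (PySem.List.pySetD up2 im.1 vj) j (PySem.List.pyGetD up2 im.1 0))).take
        (pvTrimLenB (PySem.List.pySetD (PySem.List.pySetD up2 im.1 vj) j (PySem.List.pyGetD up2 im.1 0)) n), j)]
  else []

theorem pvEmitB_eq_append (up2 : List Int) (n : Nat) (vj j : Int)
    (out : List (List Int × Int)) (im : Int × Option Int) :
    pvEmitB up2 n vj j out im = out ++ pvCh up2 n vj j im := by
  unfold pvEmitB pvCh
  split_ifs <;> simp

theorem emitB_fold (up2 : List Int) (n : Nat) (vj j : Int)
    (items : List (Int × Option Int)) (out : List (List Int × Int)) :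
    items.foldl (pvEmitB up2 n vj j) out = out ++ items.flatMap (pvCh up2 n vj j) := by
  rw [PySem.List.foldl_congr_mem items (pvEmitB up2 n vj j)
    (fun acc im => acc ++ pvCh up2 n vj j im) out (fun acc im _ => pvEmitB_eq_append up2 n vj j acc im)]
  exact PySem.List.foldl_append_eq_flatMap _ _ _

theorem flatMap_congr_mem {α β : Type} (l : List α) (f g : α → List β)
    (h : ∀ x ∈ l, f x = g x) : l.flatMap f = l.flatMap g := by
  induction l with
  | nil => rfl
  | cons x rest ih =>
    rw [List.flatMap_cons, List.flatMap_cons, h x List.mem_cons_self,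
      ih (fun y hy => h y (List.mem_cons_of_mem _ hy))]

theorem pvCh_eq_pvG (up2 : List Int) (i j : Int) (hi0 : 0 ≤ i) (hij : i < j)
    (hj : j < (up2.length : Int)) :
    pvCh up2 up2.length (PySem.List.pyGetD up2 j 0) j (i, pvTrueM up2 i j) = pvG up2 j i := by
  have hlen : (PySem.List.pySetD (PySem.List.pySetD up2 i (PySem.List.pyGetD up2 j 0)) j
      (PySem.List.pyGetD up2 i 0)).length = up2.length := by
    simp [PySem.List.length_pySetD]
  have hcond : (PySem.List.pyGetD up2 j 0 ≤ PySem.List.pyGetD up2 i 0 ∧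
      pvMOk (pvTrueM up2 i j) (PySem.List.pyGetD up2 j 0) = true) ↔ pvHbd up2 i j = true := by
    rw [← emit_true up2 i j hi0 hij hj]
    simp
  unfold pvCh pvG
  split_ifs with h1 h2 h2
  · rw [pvTrimA_eq]
    simp [hlen]
  · exact absurd (hcond.mp h1) h2
  · exact absurd (hcond.mpr h2) h1
  · rfl

theorem bfold_spec (up2 : List Int) (last : Int) (pos : List Int)
    (hpos : ∀ i ∈ pos, 0 ≤ i ∧ i < last) :
    ∀ (d a : Nat) (out : List (List Int × Int)), a ≤ up2.length → up2.length - a = d →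
    ((PySem.List.pyRange (a : Int) (up2.length : Int) 1).foldl (pvJB up2 up2.length last)
       (pos.map (fun i => (i, pvTrueM up2 i (a : Int))), out)).2
    = out ++ (PySem.List.pyRange (a : Int) (up2.length : Int) 1).flatMap
        (fun j => if last ≤ j then pos.flatMap (pvG up2 j) else []) := by
  intro d
  induction d with
  | zero =>
    intro a out ha hd
    rw [PySem.List.pyRange_one_eq_nil (by omega)]
    simp
  | succ d ih =>
    intro a out ha hd
    rw [PySem.List.pyRange_one_cons (by omega : (a : Int) < (up2.length : Int)), List.foldl_cons,
      List.flatMap_cons]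
    have hitems : (pos.map (fun i => (i, pvTrueM up2 i (a : Int)))).map
        (pvItemUpd up2 (PySem.List.pyGetD up2 (a : Int) 0) (a : Int)) =
        pos.map (fun i => (i, pvTrueM up2 i ((a + 1 : Nat) : Int))) := by
      rw [List.map_map]
      apply List.map_congr_left
      intro i hi
      have h1 := (hpos i hi).1
      have : ((a : Int) + 1) = ((a + 1 : Nat) : Int) := by omega
      rw [Function.comp_apply, itemUpd_true up2 i (a : Int) h1 (by omega) (by omega), this]
    have hout : (pvJB up2 up2.length last (pos.map (fun i => (i, pvTrueM up2 i (a : Int))), out) (a : Int)).2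
        = out ++ (if last ≤ (a : Int) then pos.flatMap (pvG up2 (a : Int)) else []) := by
      simp only [pvJB]
      split_ifs with hla
      · rw [emitB_fold, List.flatMap_map]
        congr 1
        apply flatMap_congr_mem
        intro i hi
        have h1 := hpos i hi
        exact pvCh_eq_pvG up2 i (a : Int) h1.1 (by omega) (by omega)
      · simp
    have hst : pvJB up2 up2.length last (pos.map (fun i => (i, pvTrueM up2 i (a : Int))), out) (a : Int)
        = (pos.map (fun i => (i, pvTrueM up2 i ((a + 1 : Nat) : Int))),
           out ++ (if last ≤ (a : Int) then pos.flatMap (pvG up2 (a : Int)) else [])) := by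
      rw [← hitems, ← hout]
      rfl
    have hcast : ((a : Int) + 1) = ((a + 1 : Nat) : Int) := by omega
    rw [hst, hcast, ih (a + 1) _ (by omega) (by omega)]
    simp


theorem succB_char (orig : List Int) (k : Int) (ul : List Int × Int) (hk : k ≤ ul.2) :
    pvSuccB orig k ul.1 ul.2 = pvEA orig k ul := by
  unfold pvSuccB pvEA
  have hext : (PySem.List.pyRange ((ul.1.length : Int)) (k + 2) 1).map (fun i => i + 1) =
      PySem.List.pyRange ((ul.1.length : Int) + 1) (k + 3) 1 := by
    rw [PySem.List.pyRange_one, PySem.List.pyRange_one, List.map_map]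
    have h3 : (k + 3) - ((ul.1.length : Int) + 1) = (k + 2) - (ul.1.length : Int) := by ring
    rw [h3]
    apply List.map_congr_left
    intro x _
    simp only [Function.comp]
    ring
  rw [← hext]
  dsimp only
  set up2 := if (ul.1.length : Int) < k + 1
      then ul.1 ++ (PySem.List.pyRange ((ul.1.length : Int)) (k + 2) 1).map (fun i => i + 1)
      else ul.1 with hup2
  set pos := (PySem.List.pyRange 0 k 1).filter
      (fun i => PySem.List.pyGetD up2 i 0 == PySem.List.pyGetD orig i 0) with hposdef
  have hpos : ∀ i ∈ pos, 0 ≤ i ∧ i < ul.2 := by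
    intro i hi
    have h2 := PySem.List.mem_pyRange_one.mp (List.mem_filter.mp hi).1
    exact ⟨h2.1, by omega⟩
  have hinit : pos.map (fun i => (i, (none : Option Int))) =
      pos.map (fun i => (i, pvTrueM up2 i ((0 : Nat) : Int))) := by
    apply List.map_congr_left
    intro i _
    simp [pvTrueM_zero]
  have hb := bfold_spec up2 ul.2 pos hpos up2.length 0 [] (by omega) (by omega)
  simp only [Nat.cast_zero] at hb
  simp only [Nat.cast_zero] at hinit
  rw [hinit, hb, List.nil_append]
  by_cases hp0 : pos = []
  · rw [hp0]
    rw [show (fun (j : Int) => if ul.2 ≤ j then List.flatMap (pvG up2 j) ([] : List Int) else []) = (fun _ => []) from by funext j; split_ifs <;> simp]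
    have hnil : ∀ (r : List Int), r.flatMap (fun _ => ([] : List (List Int × Int))) = [] :=
      fun r => List.flatMap_eq_nil_iff.mpr (fun _ _ => rfl)
    rw [hnil]
    rw [show (fun (j : Int) => List.flatMap (pvG up2 j) ([] : List Int)) = (fun _ => []) from by funext j; rfl]
    rw [hnil]
  · have hlast0 : 0 ≤ ul.2 := by
      obtain ⟨i, hi⟩ := List.exists_mem_of_ne_nil pos hp0
      have := hpos i hi
      omega
    by_cases hln : ul.2 ≤ (up2.length : Int)
    · rw [PySem.List.pyRange_one_append 0 ul.2 (up2.length : Int) hlast0 hln, List.flatMap_append]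
      have h1 : (PySem.List.pyRange 0 ul.2 1).flatMap
          (fun j => if ul.2 ≤ j then pos.flatMap (pvG up2 j) else []) = [] := by
        rw [flatMap_congr_mem _ _ (fun _ => ([] : List (List Int × Int))) ?_]
        · simp
        · intro j hj
          have := PySem.List.mem_pyRange_one.mp hj
          rw [if_neg (by omega)]
      have h2 : (PySem.List.pyRange ul.2 (up2.length : Int) 1).flatMap
          (fun j => if ul.2 ≤ j then pos.flatMap (pvG up2 j) else []) =
          (PySem.List.pyRange ul.2 (up2.length : Int) 1).flatMap (fun j => pos.flatMap (pvG up2 j)) := by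
        apply flatMap_congr_mem
        intro j hj
        have := PySem.List.mem_pyRange_one.mp hj
        rw [if_pos (by omega)]
      rw [h1, h2, List.nil_append]
    · rw [PySem.List.pyRange_one_eq_nil (by omega : (up2.length : Int) ≤ ul.2)]
      rw [flatMap_congr_mem _ _ (fun _ => ([] : List (List Int × Int))) ?_]
      · simp
      · intro j hj
        have := PySem.List.mem_pyRange_one.mp hj
        rw [if_neg (by omega)]

theorem mem_pvEA (orig : List Int) (k : Int) (ul : List Int × Int) (e : List Int × Int)
    (he : e ∈ pvEA orig k ul) : ul.2 ≤ e.2 := by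
  unfold pvEA at he
  simp only [List.mem_flatMap] at he
  obtain ⟨j, hj, i, hi, hei⟩ := he
  have hjb := PySem.List.mem_pyRange_one.mp hj
  unfold pvG at hei
  split_ifs at hei <;> simp only [List.mem_singleton, List.mem_nil_iff] at hei
  all_goals rw [hei]; exact hjb.1

theorem pvRoundEq (orig : List Int) (k pp : Int)
    (st : (List (List Int × Int)) × (List (List Int × Int))) (hst : ∀ e ∈ st.2, k ≤ e.2) :
    pvRoundA orig k st pp = pvRoundB orig k st pp := by
  rw [roundA_char]
  unfold pvRoundB
  have h : st.2.flatMap (fun ul => pvSuccB orig k ul.1 ul.2) = st.2.flatMap (pvEA orig k) := by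
    apply flatMap_congr_mem
    intro ul hul
    exact succB_char orig k ul (hst ul hul)
  rw [h]

theorem inv_round (orig : List Int) (k pp : Int)
    (st : (List (List Int × Int)) × (List (List Int × Int))) (hst : ∀ e ∈ st.2, k ≤ e.2) :
    ∀ e ∈ (pvRoundA orig k st pp).2, k ≤ e.2 := by
  rw [roundA_char]
  intro e he
  simp only [List.mem_flatMap] at he
  obtain ⟨ul, hul, hee⟩ := he
  have h1 := mem_pvEA orig k ul e hee
  have h2 := hst ul hul
  omega

theorem fold_rounds_eq (orig : List Int) (k : Int) : ∀ (ps : List Int)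
    (st : (List (List Int × Int)) × (List (List Int × Int))), (∀ e ∈ st.2, k ≤ e.2) →
    ps.foldl (pvRoundA orig k) st = ps.foldl (pvRoundB orig k) st := by
  intro ps
  induction ps with
  | nil => intro st _; rfl
  | cons pp rest ih =>
    intro st hst
    rw [List.foldl_cons, List.foldl_cons, ← pvRoundEq orig k pp st hst]
    exact ih (pvRoundA orig k st pp) (inv_round orig k pp st hst)

-- ===== VERDICT (by name: the statement is the Claim_ definition above) =====
theorem elem_sym_perms_op_spec : Claim_equal_elem_sym_perms_op := by
  intro orig p k _ _
  unfold Spec_elem_sym_perms_op elem_sym_perms_op elem_sym_perms_op_alt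
  rw [fold_rounds_eq orig k _ _ (by intro e he; simp at he; simp [he])]
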